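-- pv_equiv track=rewrite | github.com/sangeun99/algorithm | 프로그래머스/1/42840. 모의고사/모의고사.py | solution
-- ===== SOURCE A (Python) =====
-- def solution(answers):
--     scores = [0, 0, 0]
--     for i in range(len(answers)):
--         if i % 5 + 1 == answers[i]:
--             scores[0] += 1
--
--     for i in range(len(answers)):
--         if i % 2 == 0:
--             if answers[i] == 2:
--                 scores[1] += 1
--         elif i % 8 == 1:
--             if answers[i] == 1:
--                 scores[1] += 1
--         elif i % 8 == 3:
--             if answers[i] == 3:
--                 scores[1] += 1
--         elif i % 8 == 5:
--             if answers[i] == 4: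
--                 scores[1] += 1
--         elif i % 8 == 7:
--             if answers[i] == 5:
--                 scores[1] += 1
--
--     for i in range(len(answers)):
--         if i % 10 == 0 or i % 10 == 1:
--             if answers[i] == 3:
--                 scores[2] += 1
--         elif i % 10 == 2 or i % 10 == 3:
--             if answers[i] == 1:
--                 scores[2] += 1
--         elif i % 10 == 4 or i % 10 == 5:
--             if answers[i] == 2:
--                 scores[2] += 1
--         elif i % 10 == 6 or i % 10 == 7:
--             if answers[i] == 4:
--                 scores[2] += 1
--         elif i % 10 == 8 or i % 10 == 9:
--             if answers[i] == 5:
--                 scores[2] += 1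
--
--     answer = []
--     for i in range(len(scores)):
--         if not answer:
--             answer.append(i+1)
--         elif scores[answer[0] - 1] == scores[i]:
--             answer.append(i+1)
--         elif scores[answer[0] - 1] < scores[i]:
--             answer = [i+1]
--
--     return answer
-- ===== SOURCE B (Python) =====
-- def solution(answers):
--     # Histogram pass: bucket every position by (index mod 40, answer given there);
--     # 40 = lcm of the three cycle lengths, so a bucket decides every supervisor's hit at once.
--     hits = {}
--     for i, a in enumerate(answers):
--         key = (i % 40, a)
--         hits[key] = hits.get(key, 0) + 1
--     # Score each supervisor from the 40-bucket table alone (no second pass over answers).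
--     patterns = [[1, 2, 3, 4, 5], [2, 1, 2, 3, 2, 4, 2, 5], [3, 3, 1, 1, 2, 2, 4, 4, 5, 5]]
--     scores = [sum(hits.get((r, p[r % len(p)]), 0) for r in range(40)) for p in patterns]
--     best = max(scores)
--     return [k + 1 for k in range(3) if scores[k] == best]
-- ===== Notes on version B (the rewrite author's own statement) =====
-- stated objective: alternative
-- what changed: A's three separate branch-enumerated counting loops over answers are replaced by one histogram pass that buckets positions by (index mod 40, answer) into a dict, after which each supervisor's score is computed from the fixed 40-bucket table alone (the patterns never see the input data), followed by max-and-filter selection instead of A's stateful argmax loop.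
import Mathlib
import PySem

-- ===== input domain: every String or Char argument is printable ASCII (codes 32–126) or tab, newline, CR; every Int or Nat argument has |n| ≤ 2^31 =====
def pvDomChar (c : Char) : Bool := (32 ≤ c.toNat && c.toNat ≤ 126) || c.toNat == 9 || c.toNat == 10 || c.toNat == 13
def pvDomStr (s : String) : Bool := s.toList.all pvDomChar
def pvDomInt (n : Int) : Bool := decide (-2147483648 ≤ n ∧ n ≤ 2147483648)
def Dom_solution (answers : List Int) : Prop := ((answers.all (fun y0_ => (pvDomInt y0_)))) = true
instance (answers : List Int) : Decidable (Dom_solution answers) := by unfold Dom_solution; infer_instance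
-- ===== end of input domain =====

-- B replaces A's three branch-enumerated counting loops by one histogram pass bucketing positions
-- by (index mod 40, answer) into a dict, scores each supervisor from the fixed 40-bucket table,
-- and selects the winners by max-and-filter instead of A's stateful argmax loop (objective: alternative).

-- ===== PORT A =====
def solution (answers : List Int) : List Int :=
  let s0 : Int := (PySem.List.pyRange 0 (PySem.List.len answers) 1).foldl
    (fun acc i => if PySem.Int.mod i 5 + 1 = PySem.List.pyGetD answers i 0 then acc + 1 else acc) 0
  let s1 : Int := (PySem.List.pyRange 0 (PySem.List.len answers) 1).foldl
    (fun acc i =>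
      if PySem.Int.mod i 2 = 0 then (if PySem.List.pyGetD answers i 0 = 2 then acc + 1 else acc)
      else if PySem.Int.mod i 8 = 1 then (if PySem.List.pyGetD answers i 0 = 1 then acc + 1 else acc)
      else if PySem.Int.mod i 8 = 3 then (if PySem.List.pyGetD answers i 0 = 3 then acc + 1 else acc)
      else if PySem.Int.mod i 8 = 5 then (if PySem.List.pyGetD answers i 0 = 4 then acc + 1 else acc)
      else if PySem.Int.mod i 8 = 7 then (if PySem.List.pyGetD answers i 0 = 5 then acc + 1 else acc)
      else acc) 0
  let s2 : Int := (PySem.List.pyRange 0 (PySem.List.len answers) 1).foldl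
    (fun acc i =>
      if PySem.Int.mod i 10 = 0 ∨ PySem.Int.mod i 10 = 1 then (if PySem.List.pyGetD answers i 0 = 3 then acc + 1 else acc)
      else if PySem.Int.mod i 10 = 2 ∨ PySem.Int.mod i 10 = 3 then (if PySem.List.pyGetD answers i 0 = 1 then acc + 1 else acc)
      else if PySem.Int.mod i 10 = 4 ∨ PySem.Int.mod i 10 = 5 then (if PySem.List.pyGetD answers i 0 = 2 then acc + 1 else acc)
      else if PySem.Int.mod i 10 = 6 ∨ PySem.Int.mod i 10 = 7 then (if PySem.List.pyGetD answers i 0 = 4 then acc + 1 else acc)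
      else if PySem.Int.mod i 10 = 8 ∨ PySem.Int.mod i 10 = 9 then (if PySem.List.pyGetD answers i 0 = 5 then acc + 1 else acc)
      else acc) 0
  let scores : List Int := [s0, s1, s2]
  (PySem.List.pyRange 0 3 1).foldl
    (fun answer i =>
      if answer = ([] : List Int) then answer ++ [i + 1]
      else if PySem.List.pyGetD scores (PySem.List.pyGetD answer 0 0 - 1) 0 = PySem.List.pyGetD scores i 0 then
        answer ++ [i + 1]
      else if PySem.List.pyGetD scores (PySem.List.pyGetD answer 0 0 - 1) 0 < PySem.List.pyGetD scores i 0 then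
        [i + 1]
      else answer) []

-- ===== PORT B =====
def solution_alt (answers : List Int) : List Int :=
  let hits : PySem.Dict (Int × Int) Int :=
    (PySem.List.enumerate answers 0).foldl
      (fun d q => d.insert (PySem.Int.mod q.1 40, q.2) (d.getD (PySem.Int.mod q.1 40, q.2) 0 + 1))
      PySem.Dict.empty
  let patterns : List (List Int) := [[1,2,3,4,5], [2,1,2,3,2,4,2,5], [3,3,1,1,2,2,4,4,5,5]]
  let scores : List Int := patterns.map (fun p =>
    ((PySem.List.pyRange 0 40 1).map
      (fun r => hits.getD (r, PySem.List.pyGetD p (PySem.Int.mod r (PySem.List.len p)) 0) 0)).sum)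
  let best : Int := (PySem.List.max? scores (fun x => x)).getD 0  -- max(scores); getD 0 unreachable (scores has 3 elements)
  ((PySem.List.pyRange 0 3 1).filter (fun k => PySem.List.pyGetD scores k 0 = best)).map (· + 1)

-- ===== PRECONDITION & SPEC =====
def Spec_solution (answers : List Int) (out : List Int) : Prop := out = solution_alt answers
instance (answers : List Int) (out : List Int) : Decidable (Spec_solution answers out) := by unfold Spec_solution; infer_instance

-- ===== CLAIM (what is proved, stated in full; the proofs are below) =====
def Claim_equal_solution : Prop := ∀ (answers : List Int), Dom_solution answers → Spec_solution answers (solution answers)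

-- ===== LEMMAS AND PROOFS =====

-- A's first loop body counts exactly a hit of pattern p1 at index i
theorem pv_body1 (i a s : Int) :
    (if PySem.Int.mod i 5 + 1 = a then s + 1 else s)
      = s + (if a = PySem.List.pyGetD ([1, 2, 3, 4, 5] : List Int) (PySem.Int.mod i 5) 0 then 1 else 0) := by
  rw [PySem.Int.mod_eq_emod_of_pos (by norm_num)]
  have h : i % 5 = 0 ∨ i % 5 = 1 ∨ i % 5 = 2 ∨ i % 5 = 3 ∨ i % 5 = 4 := by omega
  rcases h with h | h | h | h | h <;> rw [h] <;>
    norm_num [PySem.List.pyGetD_ofNat'] <;> split_ifs <;> omega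

-- A's second loop body counts exactly a hit of pattern p2 at index i
theorem pv_body2 (i a s : Int) :
    (if PySem.Int.mod i 2 = 0 then (if a = 2 then s + 1 else s)
     else if PySem.Int.mod i 8 = 1 then (if a = 1 then s + 1 else s)
     else if PySem.Int.mod i 8 = 3 then (if a = 3 then s + 1 else s)
     else if PySem.Int.mod i 8 = 5 then (if a = 4 then s + 1 else s)
     else if PySem.Int.mod i 8 = 7 then (if a = 5 then s + 1 else s)
     else s)
      = s + (if a = PySem.List.pyGetD ([2, 1, 2, 3, 2, 4, 2, 5] : List Int) (PySem.Int.mod i 8) 0 then 1 else 0) := by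
  rw [PySem.Int.mod_eq_emod_of_pos (show (0:Int) < 2 by norm_num),
      PySem.Int.mod_eq_emod_of_pos (show (0:Int) < 8 by norm_num)]
  have hiff : i % 2 = 0 ↔ (i % 8 = 0 ∨ i % 8 = 2 ∨ i % 8 = 4 ∨ i % 8 = 6) := by omega
  simp only [hiff]
  have h : i % 8 = 0 ∨ i % 8 = 1 ∨ i % 8 = 2 ∨ i % 8 = 3 ∨ i % 8 = 4 ∨ i % 8 = 5 ∨ i % 8 = 6 ∨ i % 8 = 7 := by
    omega
  rcases h with h | h | h | h | h | h | h | h <;> rw [h] <;>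
    norm_num [PySem.List.pyGetD_ofNat'] <;> split_ifs <;> omega

-- A's third loop body counts exactly a hit of pattern p3 at index i
theorem pv_body3 (i a s : Int) :
    (if PySem.Int.mod i 10 = 0 ∨ PySem.Int.mod i 10 = 1 then (if a = 3 then s + 1 else s)
     else if PySem.Int.mod i 10 = 2 ∨ PySem.Int.mod i 10 = 3 then (if a = 1 then s + 1 else s)
     else if PySem.Int.mod i 10 = 4 ∨ PySem.Int.mod i 10 = 5 then (if a = 2 then s + 1 else s)
     else if PySem.Int.mod i 10 = 6 ∨ PySem.Int.mod i 10 = 7 then (if a = 4 then s + 1 else s)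
     else if PySem.Int.mod i 10 = 8 ∨ PySem.Int.mod i 10 = 9 then (if a = 5 then s + 1 else s)
     else s)
      = s + (if a = PySem.List.pyGetD ([3, 3, 1, 1, 2, 2, 4, 4, 5, 5] : List Int) (PySem.Int.mod i 10) 0 then 1 else 0) := by
  rw [PySem.Int.mod_eq_emod_of_pos (show (0:Int) < 10 by norm_num)]
  have h : i % 10 = 0 ∨ i % 10 = 1 ∨ i % 10 = 2 ∨ i % 10 = 3 ∨ i % 10 = 4 ∨ i % 10 = 5 ∨
      i % 10 = 6 ∨ i % 10 = 7 ∨ i % 10 = 8 ∨ i % 10 = 9 := by omega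
  rcases h with h | h | h | h | h | h | h | h | h | h <;> rw [h] <;>
    norm_num [PySem.List.pyGetD_ofNat'] <;> split_ifs <;> omega

-- residues mod 40 refine residues mod L when L divides 40
theorem pv_modmod (i L : Int) (h1 : 0 < L) (h2 : L ∣ 40) :
    PySem.Int.mod (PySem.Int.mod i 40) L = PySem.Int.mod i L := by
  rw [PySem.Int.mod_eq_emod_of_pos h1, PySem.Int.mod_eq_emod_of_pos h1,
      PySem.Int.mod_eq_emod_of_pos (show (0:Int) < 40 by norm_num)]
  exact Int.emod_emod_of_dvd i h2

-- one key of the histogram contributes to exactly one of the 40 buckets of a pattern's score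
set_option maxHeartbeats 4000000 in
set_option maxRecDepth 8192 in
theorem pv_single_key (p : List Int) (c a : Int) (h0 : 0 ≤ c) (h40 : c < 40) :
    ((PySem.List.pyRange 0 40 1).map
      (fun r => if ((c, a) : Int × Int) = (r, PySem.List.pyGetD p (PySem.Int.mod r (PySem.List.len p)) 0) then (1:Int) else 0)).sum
      = if a = PySem.List.pyGetD p (PySem.Int.mod c (PySem.List.len p)) 0 then (1:Int) else 0 := by
  have hr : PySem.List.pyRange 0 40 1 =
      [0,1,2,3,4,5,6,7,8,9,10,11,12,13,14,15,16,17,18,19,20,21,22,23,24,25,26,27,28,29,30,31,32,33,34,35,36,37,38,39] := by decide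
  rw [hr]
  have hc : c = 0 ∨ c = 1 ∨ c = 2 ∨ c = 3 ∨ c = 4 ∨ c = 5 ∨ c = 6 ∨ c = 7 ∨ c = 8 ∨ c = 9 ∨
      c = 10 ∨ c = 11 ∨ c = 12 ∨ c = 13 ∨ c = 14 ∨ c = 15 ∨ c = 16 ∨ c = 17 ∨ c = 18 ∨ c = 19 ∨
      c = 20 ∨ c = 21 ∨ c = 22 ∨ c = 23 ∨ c = 24 ∨ c = 25 ∨ c = 26 ∨ c = 27 ∨ c = 28 ∨ c = 29 ∨
      c = 30 ∨ c = 31 ∨ c = 32 ∨ c = 33 ∨ c = 34 ∨ c = 35 ∨ c = 36 ∨ c = 37 ∨ c = 38 ∨ c = 39 := by omega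
  rcases hc with h|h|h|h|h|h|h|h|h|h|h|h|h|h|h|h|h|h|h|h|h|h|h|h|h|h|h|h|h|h|h|h|h|h|h|h|h|h|h|h <;>
    subst h <;> norm_num [Prod.ext_iff]

-- summing the histogram's 40 buckets for a pattern counts the per-position hits
theorem pv_sum_count (p : List Int) (ks : List (Int × Int)) (hk : ∀ k ∈ ks, 0 ≤ k.1 ∧ k.1 < 40) :
    ((PySem.List.pyRange 0 40 1).map
      (fun r => ((ks.count (r, PySem.List.pyGetD p (PySem.Int.mod r (PySem.List.len p)) 0) : Nat) : Int))).sum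
      = (ks.map (fun k => if k.2 = PySem.List.pyGetD p (PySem.Int.mod k.1 (PySem.List.len p)) 0 then (1:Int) else 0)).sum := by
  induction ks with
  | nil => simp
  | cons k ks ih =>
    have hk' : ∀ q ∈ ks, 0 ≤ q.1 ∧ q.1 < 40 := fun q hq => hk q (List.mem_cons_of_mem _ hq)
    have hkk := hk k (List.mem_cons_self ..)
    simp only [List.count_cons, List.map_cons, List.sum_cons]
    push_cast
    rw [show (fun r => ((ks.count (r, PySem.List.pyGetD p (PySem.Int.mod r (PySem.List.len p)) 0) : Nat) : Int)
          + (if (k == (r, PySem.List.pyGetD p (PySem.Int.mod r (PySem.List.len p)) 0)) = true then (1:Int) else 0))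
        = fun r => ((ks.count (r, PySem.List.pyGetD p (PySem.Int.mod r (PySem.List.len p)) 0) : Nat) : Int)
          + (if (k.1, k.2) = (r, PySem.List.pyGetD p (PySem.Int.mod r (PySem.List.len p)) 0) then (1:Int) else 0)
        from by funext r; simp]
    rw [PySem.List.sum_map_add_int, ih hk', pv_single_key p k.1 k.2 hkk.1 hkk.2]
    ring

-- the two selection stages agree as functions of the three scores
set_option maxHeartbeats 4000000 in
set_option maxRecDepth 8192 in
theorem pv_select (x y z : Int) :
    ((PySem.List.pyRange 0 3 1).foldl
      (fun answer i =>
        if answer = ([] : List Int) then answer ++ [i + 1]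
        else if PySem.List.pyGetD [x, y, z] (PySem.List.pyGetD answer 0 0 - 1) 0 = PySem.List.pyGetD [x, y, z] i 0 then
          answer ++ [i + 1]
        else if PySem.List.pyGetD [x, y, z] (PySem.List.pyGetD answer 0 0 - 1) 0 < PySem.List.pyGetD [x, y, z] i 0 then
          [i + 1]
        else answer) [])
      = ((PySem.List.pyRange 0 3 1).filter
          (fun k => PySem.List.pyGetD [x, y, z] k 0 = (PySem.List.max? [x, y, z] (fun v => v)).getD 0)).map (· + 1) := by
  have hr : PySem.List.pyRange 0 3 1 = [0, 1, 2] := by decide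
  have hm : PySem.List.max? ([x, y, z] : List Int) (fun v => v) = some (max (max x y) z) := by
    rw [PySem.List.max?_id_cons]; simp [List.foldl]
  rw [hr, hm]
  clear hr hm
  simp only [Option.getD_some]
  generalize hM : max (max x y) z = m
  have hx : x ≤ m := by omega
  have hy : y ≤ m := by omega
  have hz : z ≤ m := by omega
  have hmem : m = x ∨ m = y ∨ m = z := by omega
  clear hM
  norm_num only [List.filter_cons, List.filter_nil, List.foldl_cons, List.foldl_nil,
    PySem.List.pyGetD_ofNat', List.getD_cons_zero, List.getD_cons_succ, decide_eq_true_eq,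
    List.nil_append, List.cons_append, List.singleton_append, List.append_nil, List.cons_ne_nil, ne_eq]
  split_ifs <;>
    first
      | omega
      | (norm_num [PySem.List.pyGetD_ofNat'] at *; omega)
      | (norm_num [PySem.List.pyGetD_ofNat']; done)
      | (norm_num [PySem.List.pyGetD_ofNat'] at *; done)
      | (simp_all; done)

-- B's score of one pattern equals the per-position hit count A accumulates
theorem pv_score (answers : List Int) (p : List Int)
    (hL : 0 < PySem.List.len p) (hdvd : PySem.List.len p ∣ 40) :
    ((PySem.List.pyRange 0 40 1).map
      (fun r =>
        ((PySem.List.enumerate answers 0).foldl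
          (fun d q => d.insert (PySem.Int.mod q.1 40, q.2) (d.getD (PySem.Int.mod q.1 40, q.2) 0 + 1))
          PySem.Dict.empty).getD (r, PySem.List.pyGetD p (PySem.Int.mod r (PySem.List.len p)) 0) 0)).sum
      = ((PySem.List.pyRange 0 (PySem.List.len answers) 1).map
          (fun i => if PySem.List.pyGetD answers i 0 = PySem.List.pyGetD p (PySem.Int.mod i (PySem.List.len p)) 0 then (1:Int) else 0)).sum := by
  have hg : ∀ v : Int × Int,
      ((PySem.List.enumerate answers 0).foldl
        (fun d q => d.insert (PySem.Int.mod q.1 40, q.2) (d.getD (PySem.Int.mod q.1 40, q.2) 0 + 1))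
        PySem.Dict.empty).getD v 0
      = ((((PySem.List.enumerate answers 0).map (fun q => (PySem.Int.mod q.1 40, q.2))).count v : Nat) : Int) := by
    intro v
    conv_lhs => rw [← List.foldl_map (f := fun q : Int × Int => (PySem.Int.mod q.1 40, q.2))
      (g := fun (d : PySem.Dict (Int × Int) Int) x => d.insert x (d.getD x 0 + 1))]
    rw [PySem.Dict.getD_foldl_insert_add_one, PySem.Dict.getD_empty]
    simp
  simp only [hg]
  rw [pv_sum_count]
  · rw [PySem.List.enumerate_eq_map_pyRange answers 0, List.map_map, List.map_map]
    refine congrArg List.sum (List.map_congr_left fun j hj => ?_)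
    simp only [Function.comp]
    rw [pv_modmod j (PySem.List.len p) hL hdvd]
  · intro k hk
    obtain ⟨q, _, rfl⟩ := List.mem_map.1 hk
    exact ⟨PySem.Int.mod_nonneg _ (by norm_num), PySem.Int.mod_lt _ (by norm_num)⟩

theorem solution_eq_alt (answers : List Int) : solution answers = solution_alt answers := by
  simp only [solution, solution_alt]
  simp only [pv_body1, pv_body2, pv_body3]
  simp only [PySem.List.foldl_add, zero_add]
  have h5 : PySem.List.len ([1,2,3,4,5] : List Int) = 5 := by decide
  have h8 : PySem.List.len ([2,1,2,3,2,4,2,5] : List Int) = 8 := by decide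
  have h10 : PySem.List.len ([3,3,1,1,2,2,4,4,5,5] : List Int) = 10 := by decide
  simp only [List.map_cons, List.map_nil]
  simp only [pv_score answers [1,2,3,4,5] (by decide) (by decide),
    pv_score answers [2,1,2,3,2,4,2,5] (by decide) (by decide),
    pv_score answers [3,3,1,1,2,2,4,4,5,5] (by decide) (by decide)]
  simp only [h5, h8, h10]
  apply pv_select

-- ===== VERDICT (by name: the statement is the Claim_ definition above) =====
theorem solution_spec : Claim_equal_solution := by
  intro answers _
  unfold Spec_solution
  exact solution_eq_alt answers
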